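-- pv_equiv track=rewrite | github.com/ArtemiiUstiukhin/Advent_of_Code_2024 | day_12/solution_2.py | find_border_plots
-- ===== SOURCE A (Python) =====
-- directions = [(-1,0), (0,-1), (1,0), (0,1)]
--
-- def find_border_plots(region):
--     border_plots = set()
--     for y,x in region:
--         for i in range(len(directions)):
--             dy,dx = directions[i]
--             if not (y + dy, x + dx) in region:
--                 # add plot cords + border direction index
--                 border_plots.add((y,x,i))
--     return border_plots
-- ===== SOURCE B (Python) =====
-- directions = [(-1,0), (0,-1), (1,0), (0,1)]
--
-- def find_border_plots(region):
--     cells = set(region)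
--     # one bulk set difference per direction: plots whose neighbour in that direction is absent
--     missing = [cells - {(y - dy, x - dx) for (y, x) in region} for (dy, dx) in directions]
--     return {(y, x, i) for (y, x) in region for i, m in enumerate(missing) if (y, x) in m}
-- ===== Notes on version B (the rewrite author's own statement) =====
-- stated objective: alternative
-- what changed: B is direction-staged: for each of the four directions it builds the shifted set of the region and takes one bulk set difference (cells minus shifted) to get all plots lacking that neighbour, then emits the triples by reading those four precomputed difference sets; A instead tests each of the four neighbours of each plot individually against the region list.
import Mathlib
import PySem

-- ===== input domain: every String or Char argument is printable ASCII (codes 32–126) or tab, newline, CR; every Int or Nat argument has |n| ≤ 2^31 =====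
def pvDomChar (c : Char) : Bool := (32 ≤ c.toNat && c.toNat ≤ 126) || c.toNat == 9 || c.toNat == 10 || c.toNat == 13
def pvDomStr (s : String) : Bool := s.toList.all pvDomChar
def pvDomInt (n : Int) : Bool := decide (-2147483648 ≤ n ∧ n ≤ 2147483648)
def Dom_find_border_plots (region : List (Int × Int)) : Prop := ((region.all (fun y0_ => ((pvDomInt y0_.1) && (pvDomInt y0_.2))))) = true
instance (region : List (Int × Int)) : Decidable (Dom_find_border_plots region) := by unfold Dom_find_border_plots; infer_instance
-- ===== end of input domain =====

-- B is direction-staged: one bulk set difference per direction (cells minus the shifted region)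
-- yields the plots lacking that neighbour, and the triples are emitted from those four
-- precomputed difference sets; A tests each neighbour of each plot against the region list.
-- (Python returns a set; both ports model it as the insertion-ordered list of distinct triples.)

-- ===== PORT A =====
def directions : List (Int × Int) := [(-1,0), (0,-1), (1,0), (0,1)]

def find_border_plots (region : List (Int × Int)) : List (Int × Int × Int) :=
  region.foldl (fun border_plots yx =>
    (PySem.List.pyRange 0 (directions.length : Int) 1).foldl (fun bp i =>
      let d := PySem.List.pyGetD directions i (0, 0)
      if !(decide ((yx.1 + d.1, yx.2 + d.2) ∈ region)) then
        PySem.Set.add bp (yx.1, yx.2, i)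
      else bp) border_plots) PySem.Set.empty

-- ===== PORT B =====
def find_border_plots_alt (region : List (Int × Int)) : List (Int × Int × Int) :=
  let cells : PySem.Set (Int × Int) := PySem.Set.ofList region
  let missing : List (PySem.Set (Int × Int)) := directions.map (fun d =>
    PySem.Set.diff cells (PySem.Set.ofList (region.map (fun yx => (yx.1 - d.1, yx.2 - d.2)))))
  PySem.Set.ofList (region.flatMap (fun yx =>
    (PySem.List.enumerate missing).filterMap (fun p =>
      if PySem.Set.contains p.2 yx then some (yx.1, yx.2, p.1) else none)))

-- ===== PRECONDITION & SPEC =====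
def Spec_find_border_plots (region : List (Int × Int)) (out : List (Int × Int × Int)) : Prop := out = find_border_plots_alt region
instance (region : List (Int × Int)) (out : List (Int × Int × Int)) : Decidable (Spec_find_border_plots region out) := by unfold Spec_find_border_plots; infer_instance

-- ===== CLAIM (what is proved, stated in full; the proofs are below) =====
def Claim_equal_find_border_plots : Prop := ∀ (region : List (Int × Int)), Dom_find_border_plots region → Spec_find_border_plots region (find_border_plots region)

-- ===== LEMMAS AND PROOFS =====

-- the triples plot yx contributes, stated via membership in `region`
def trip (region : List (Int × Int)) (yx : Int × Int) : List (Int × Int × Int) :=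
  (PySem.List.enumerate directions).filterMap (fun p =>
    if (yx.1 + p.2.1, yx.2 + p.2.2) ∈ region then none
    else some (yx.1, yx.2, p.1))

-- A-side: the inner direction loop adds exactly trip region yx
theorem inner_eq (region : List (Int × Int)) (bp : List (Int × Int × Int)) (yx : Int × Int) :
    (PySem.List.pyRange 0 (directions.length : Int) 1).foldl (fun bp i =>
      let d := PySem.List.pyGetD directions i (0, 0)
      if !(decide ((yx.1 + d.1, yx.2 + d.2) ∈ region)) then
        PySem.Set.add bp (yx.1, yx.2, i)
      else bp) bp
      = PySem.Set.update bp (trip region yx) := by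
  have hr : PySem.List.pyRange 0 (directions.length : Int) 1 = [0, 1, 2, 3] := by decide
  have h0 : PySem.List.pyGetD directions 0 (0, 0) = (-1, 0) := by decide
  have h1 : PySem.List.pyGetD directions 1 (0, 0) = (0, -1) := by decide
  have h2 : PySem.List.pyGetD directions 2 (0, 0) = (1, 0) := by decide
  have h3 : PySem.List.pyGetD directions 3 (0, 0) = (0, 1) := by decide
  rw [hr]
  simp only [List.foldl, h0, h1, h2, h3]
  simp only [trip, directions, PySem.List.enumerate_cons, PySem.List.enumerate_nil,
    List.filterMap_cons, List.filterMap_nil]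
  by_cases c0 : (yx.1 + -1, yx.2) ∈ region <;>
    by_cases c1 : (yx.1, yx.2 + -1) ∈ region <;>
      by_cases c2 : (yx.1 + 1, yx.2) ∈ region <;>
        by_cases c3 : (yx.1, yx.2 + 1) ∈ region <;>
          simp [c0, c1, c2, c3, PySem.Set.update, List.foldl]

theorem fold_update_eq (f : (Int × Int) → List (Int × Int × Int)) :
    ∀ (xs : List (Int × Int)) (s : PySem.Set (Int × Int × Int)),
      xs.foldl (fun s p => PySem.Set.update s (f p)) s
        = PySem.Set.update s (xs.flatMap f) := by
  intro xs
  induction xs with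
  | nil => intro s; simp [PySem.Set.update]
  | cons p xs ih =>
      intro s
      simp [List.flatMap_cons, PySem.Set.update_append, ih]

theorem a_eq (region : List (Int × Int)) :
    find_border_plots region = PySem.Set.ofList (region.flatMap (trip region)) := by
  unfold find_border_plots
  refine Eq.trans
    (PySem.List.foldl_congr_mem region _ (fun s p => PySem.Set.update s (trip region p))
      PySem.Set.empty ?_) ?_
  · intro acc x _
    exact inner_eq region acc x
  · rw [fold_update_eq]
    rfl

-- B-side: for a plot of the region, membership in the i-th difference set is exactly
-- absence of the i-th neighbour
theorem b_pointwise (region : List (Int × Int)) (yx : Int × Int) (hyx : yx ∈ region) :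
    (PySem.List.enumerate (directions.map (fun d =>
      PySem.Set.diff (PySem.Set.ofList region)
        (PySem.Set.ofList (region.map (fun z => (z.1 - d.1, z.2 - d.2))))))).filterMap (fun p =>
      if PySem.Set.contains p.2 yx then some (yx.1, yx.2, p.1) else none)
      = trip region yx := by
  have hmem : ∀ d : Int × Int,
      (PySem.Set.contains (PySem.Set.diff (PySem.Set.ofList region)
        (PySem.Set.ofList (region.map (fun z => (z.1 - d.1, z.2 - d.2))))) yx)
      = !(decide ((yx.1 + d.1, yx.2 + d.2) ∈ region)) := by
    intro d
    have hsh : ((yx.1 + d.1, yx.2 + d.2) ∈ region) ↔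
        yx ∈ region.map (fun z : Int × Int => (z.1 - d.1, z.2 - d.2)) := by
      constructor
      · intro h
        exact List.mem_map.2 ⟨(yx.1 + d.1, yx.2 + d.2), h, by simp⟩
      · intro h
        rcases List.mem_map.1 h with ⟨z, hz, hez⟩
        have h1 : z.1 - d.1 = yx.1 := congrArg Prod.fst hez
        have h2 : z.2 - d.2 = yx.2 := congrArg Prod.snd hez
        have : z = (yx.1 + d.1, yx.2 + d.2) := by
          cases z; simp at h1 h2 ⊢; omega
        rwa [this] at hz
    by_cases hn : (yx.1 + d.1, yx.2 + d.2) ∈ region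
    · simp [PySem.Set.contains_eq_listContains, PySem.Set.mem_diff, PySem.Set.mem_ofList,
        hn, hsh.1 hn]
    · have hnot : yx ∉ region.map (fun z : Int × Int => (z.1 - d.1, z.2 - d.2)) :=
        fun h => hn (hsh.2 h)
      simp only [PySem.Set.contains_eq_listContains, hn, decide_false, Bool.not_false,
        List.contains_eq_mem, PySem.Set.mem_diff, PySem.Set.mem_ofList, decide_eq_true_eq]
      exact ⟨hyx, hnot⟩
  simp only [directions, List.map_cons, List.map_nil,
    PySem.List.enumerate_cons, PySem.List.enumerate_nil,
    List.filterMap_cons, List.filterMap_nil, trip]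
  rw [hmem (-1, 0), hmem (0, -1), hmem (1, 0), hmem (0, 1)]
  by_cases c0 : (yx.1 + -1, yx.2) ∈ region <;>
    by_cases c1 : (yx.1, yx.2 + -1) ∈ region <;>
      by_cases c2 : (yx.1 + 1, yx.2) ∈ region <;>
        by_cases c3 : (yx.1, yx.2 + 1) ∈ region <;>
          simp [c0, c1, c2, c3]

theorem flatMap_congr_mem (xs : List (Int × Int))
    (f g : (Int × Int) → List (Int × Int × Int)) (h : ∀ x ∈ xs, f x = g x) :
    xs.flatMap f = xs.flatMap g := by
  induction xs with
  | nil => rfl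
  | cons p xs ih =>
      simp only [List.flatMap_cons]
      rw [h p (List.mem_cons_self), ih (fun x hx => h x (List.mem_cons_of_mem p hx))]

-- ===== VERDICT (by name: the statement is the Claim_ definition above) =====
theorem find_border_plots_spec : Claim_equal_find_border_plots := by
  intro region _
  show find_border_plots region = find_border_plots_alt region
  rw [a_eq]
  unfold find_border_plots_alt
  refine congrArg PySem.Set.ofList ?_
  exact flatMap_congr_mem region _ _ (fun yx hyx => (b_pointwise region yx hyx).symm)
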